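-- pv_equiv track=rewrite | github.com/lars-frogner/makemake.py | src/makemake.py | extract_flag_args
-- ===== SOURCE A (Python) =====
-- def extract_flag_args(arg_list, valid_file_endings):
--
--     # This function finds the arguments following the flags
--     # in the argument list, removes them from the argument list
--     # and returns them in a dictionary.
--
--     n_args = len(arg_list)
--     flag_args = {}
--     flag_arg_indices = []
--
--     for i in range(n_args):
--
--         if arg_list[i][0] == '-' and len(arg_list[i]) > 1:
--
--             flag = arg_list[i][1:]
--
--             if flag not in flag_args:
--                 flag_args[flag] = []
--
--             flag_arg_indices.append(i)
--
--             idx = i + 1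
--
--             # Loop through arguments following the flag
--             while idx < n_args:
--
--                 # Find the file ending of the argument if it has one
--                 dot_splitted = arg_list[idx].split('.')
--                 ending = None if len(dot_splitted) == 0 else dot_splitted[-1]
--
--                 # If the file ending is a valid one, or a new flag has been
--                 # reached, the flag argument list has ended, and the parsing
--                 # can end.
--                 if ending in valid_file_endings or arg_list[idx][0] == '-':
--
--                     break
--
--                 # Otherwise, add the argument to a separate list
--                 else:
--
--                     flag_args[flag].append(arg_list[idx])
--                     flag_arg_indices.append(idx)
--                     idx += 1
--
--     flag_arg_indices.reverse()
--
--     # Remove identified arguments from the argument list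
--     for idx in flag_arg_indices:
--         arg_list.pop(idx)
--
--     return flag_args
-- ===== SOURCE B (Python) =====
-- def extract_flag_args(arg_list, valid_file_endings):
--     # Two phases: (1) one pass over the token stream (kept as a reversed stack)
--     # splitting it into the kept tokens and an ordered list of (flag, args)
--     # pairs; (2) fold the pairs into the dictionary. No index bookkeeping,
--     # no reverse-and-pop removal loop, no interleaved dict updates.
--
--     def stops(tok):
--         # a token ends a flag's argument run: valid file ending or a new flag
--         return tok.split('.')[-1] in valid_file_endings or tok[:1] == '-'
--
--     kept, pairs = [], []
--     rest = arg_list[::-1]          # stack: next token on top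
--     while rest:
--         tok = rest.pop()
--         if tok[:1] == '-' and len(tok) > 1:
--             args = []
--             while rest and not stops(rest[-1]):
--                 args.append(rest.pop())
--             pairs.append((tok[1:], args))
--         else:
--             kept.append(tok)
--
--     flag_args = {}
--     for flag, args in pairs:
--         flag_args.setdefault(flag, []).extend(args)
--     arg_list[:] = kept
--     return flag_args
-- ===== Notes on version B (the rewrite author's own statement) =====
-- stated objective: simpler
-- what changed: B replaces A's index-collection machinery (for-loop over all indices plus flag_arg_indices list, reverse, separate pop loop, incremental dict updates) by a single stack pass splitting the token stream into (kept tokens, ordered (flag,args) pairs) followed by one fold of the pairs into the dictionary.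
import Mathlib
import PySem

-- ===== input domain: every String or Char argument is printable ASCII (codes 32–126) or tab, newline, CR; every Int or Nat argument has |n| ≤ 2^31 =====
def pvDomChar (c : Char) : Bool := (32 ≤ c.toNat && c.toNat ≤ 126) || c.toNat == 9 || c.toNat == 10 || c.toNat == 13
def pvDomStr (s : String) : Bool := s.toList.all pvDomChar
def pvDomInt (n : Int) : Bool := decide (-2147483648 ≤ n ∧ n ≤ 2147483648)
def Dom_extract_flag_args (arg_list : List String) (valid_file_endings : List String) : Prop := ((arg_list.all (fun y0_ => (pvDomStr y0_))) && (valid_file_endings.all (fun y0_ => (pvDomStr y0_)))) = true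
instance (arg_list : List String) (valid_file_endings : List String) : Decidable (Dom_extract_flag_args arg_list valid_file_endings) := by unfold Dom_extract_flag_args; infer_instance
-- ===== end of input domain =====

-- B replaces A's index machinery (for-loop over all indices, flag_arg_indices list, reverse, pop
-- loop, incremental dict updates) by one pass splitting the token stream into (kept, pairs)
-- followed by one fold of the pairs into the dictionary; objective: simpler. Both Pythons mutate
-- arg_list in place (A pops the consumed positions, B slice-assigns the kept tokens — the same
-- resulting list); the equivalence proved here is about the RETURN value (the flag dictionary).

-- ===== PORT A =====
-- arg.split('.') (separator "." is nonempty, split? is always `some`)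
def pvSplitDot (s : String) : List String := (PySem.Str.split? s ".").getD []

-- the inner `while idx < n_args` loop of A (fuel ≥ n - idx makes the recursion structural;
-- the port always supplies enough fuel, so the guard never changes the computed value)
def pvAInner (args ve : List String) (n : Nat) (flag : String) :
    Nat → Nat → PySem.Dict String (List String) → List Nat →
    PySem.Dict String (List String) × List Nat × Nat
  | 0, idx, d, ids => (d, ids, idx)
  | fuel + 1, idx, d, ids =>
    if idx < n then
      let tok := args.getD idx ""
      let ds := pvSplitDot tok
      let ending : Option String := if ds.length = 0 then none else PySem.List.pyGet? ds (-1)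
      if (ending.elim false (fun e => ve.contains e)) || (PySem.Str.pyGet? tok 0 == some '-') then
        (d, ids, idx)
      else
        pvAInner args ve n flag fuel (idx + 1) (d.modify flag [] (fun l => l ++ [tok])) (ids ++ [idx])
    else (d, ids, idx)

-- the outer `for i in range(n_args)` loop of A
def pvAOuter (args ve : List String) (n : Nat) :
    Nat → Nat → PySem.Dict String (List String) → List Nat →
    PySem.Dict String (List String) × List Nat
  | 0, _, d, ids => (d, ids)
  | fuel + 1, i, d, ids =>
    if i < n then
      let tok := args.getD i ""
      if (PySem.Str.pyGet? tok 0 == some '-') && decide ((1 : Int) < PySem.Str.len tok) then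
        let flag := PySem.Str.slice tok (some 1) none
        let d1 := if d.contains flag then d else d.insert flag []
        let r := pvAInner args ve n flag n (i + 1) d1 (ids ++ [i])
        pvAOuter args ve n fuel (i + 1) r.1 r.2.1
      else
        pvAOuter args ve n fuel (i + 1) d ids
    else (d, ids)

-- (the final `reverse` + `pop` loop of A only mutates arg_list in place; the return value is flag_args)
def extract_flag_args (arg_list : List String) (valid_file_endings : List String) : List (String × List String) :=
  (pvAOuter arg_list valid_file_endings arg_list.length arg_list.length 0 PySem.Dict.empty []).1.items

-- ===== PORT B =====
-- B's `stops`: the token ends a flag's argument run (tok.split('.')[-1] valid, or tok[:1] == '-')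
def pvBStops (ve : List String) (tok : String) : Bool :=
  ((PySem.List.pyGet? ((PySem.Str.split? tok ".").getD []) (-1)).elim false (fun e => ve.contains e))
    || (PySem.Str.slice tok none (some 1) == "-")

-- B's inner `while rest and not stops(rest[-1])` loop: `rest` is a stack holding the remaining
-- tokens with the next one on top, so popping it walks the forward list; `args` accumulates pops
def pvBTake (ve : List String) : List String → List String → List String × List String
  | args, [] => (args, [])
  | args, t :: rest =>
    if pvBStops ve t then (args, t :: rest)
    else pvBTake ve (args ++ [t]) rest

-- the remainder the inner loop leaves is a suffix (cited by pvBLoop's decreasing_by)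
theorem pvBTake_snd_le (ve : List String) :
    ∀ (l args : List String), (pvBTake ve args l).2.length ≤ l.length := by
  intro l
  induction l with
  | nil => intro args; simp [pvBTake]
  | cons t rest ih =>
    intro args
    simp only [pvBTake]
    by_cases h : pvBStops ve t
    · simp [h]
    · simp only [h, if_false, Bool.false_eq_true]
      exact Nat.le_succ_of_le (ih (args ++ [t]))

-- B's outer `while rest` loop, accumulating the kept tokens and the (flag, args) pairs
def pvBLoop (ve : List String) :
    List String → List String → List (String × List String) →
    List String × List (String × List String)
  | [], kept, pairs => (kept, pairs)
  | tok :: rest, kept, pairs =>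
    if (PySem.Str.slice tok none (some 1) == "-") && decide ((1 : Int) < PySem.Str.len tok) then
      let c := pvBTake ve [] rest
      pvBLoop ve c.2 kept (pairs ++ [(PySem.Str.slice tok (some 1) none, c.1)])
    else
      pvBLoop ve rest (kept ++ [tok]) pairs
termination_by l _ _ => l.length
decreasing_by
  · exact Nat.lt_succ_of_le (pvBTake_snd_le ve rest [])
  · simp

-- B's second phase: fold the pairs into the dictionary
-- (flag_args.setdefault(flag, []).extend(args) = setdefault then append-modify)
def extract_flag_args_alt (arg_list : List String) (valid_file_endings : List String) : List (String × List String) :=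
  ((pvBLoop valid_file_endings arg_list [] []).2.foldl
      (fun d p => (d.setdefault p.1 []).modify p.1 [] (fun l => l ++ p.2))
      PySem.Dict.empty).items

-- ===== PRECONDITION & SPEC =====
-- Pre_ excludes arg lists containing an empty-string token: there Python A raises IndexError
-- (arg_list[i][0] on the empty string) and returns nothing.
def Pre_extract_flag_args (arg_list : List String) (valid_file_endings : List String) : Prop :=
  "" ∉ arg_list
instance (arg_list : List String) (valid_file_endings : List String) : Decidable (Pre_extract_flag_args arg_list valid_file_endings) := by unfold Pre_extract_flag_args; infer_instance

def pvWitness_extract_flag_args : List String × List String := (["-f", "x", "a.txt"], ["txt"])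

def Spec_extract_flag_args (arg_list : List String) (valid_file_endings : List String) (out : List (String × List String)) : Prop := out = extract_flag_args_alt arg_list valid_file_endings
instance (arg_list : List String) (valid_file_endings : List String) (out : List (String × List String)) : Decidable (Spec_extract_flag_args arg_list valid_file_endings out) := by unfold Spec_extract_flag_args; infer_instance

-- ===== CLAIM (what is proved, stated in full; the proofs are below) =====
def Claim_equal_extract_flag_args : Prop := ∀ (arg_list : List String) (valid_file_endings : List String), Dom_extract_flag_args arg_list valid_file_endings → Pre_extract_flag_args arg_list valid_file_endings → Spec_extract_flag_args arg_list valid_file_endings (extract_flag_args arg_list valid_file_endings)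

-- ===== LEMMAS AND PROOFS =====

-- A's `arg_list[i][0] == '-'` equals B's `arg_list[i][:1] == '-'` (Lean-side ports; both total)
theorem pv_dash_eq (s : String) :
    (PySem.Str.pyGet? s 0 == some '-') = (PySem.Str.slice s none (some 1) == "-") := by
  simp only [PySem.Str.slice, PySem.Str.pyGet?, PySem.Chars.slice, PySem.Chars.pyGet?]
  have h1 : PySem.List.slice s.toList none (some 1) = s.toList.take 1 := by
    simpa using PySem.List.slice_to_natCast (xs := s.toList) (b := 1)
  rw [h1]
  have hm : "-" = String.ofList ['-'] := rfl
  cases s.toList with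
  | nil => simp [PySem.List.pyGet?, hm]
  | cons c t =>
    simp [PySem.List.pyGet?, PySem.List.pyIdx?, hm]
    rw [String.ofList_inj]
    simp

-- A's `None if len(ds)==0 else ds[-1]` equals B's `ds[-1]` (pyGet? of [] is already none)
theorem pv_ending_eq (ds : List String) :
    (if ds.length = 0 then (none : Option String) else PySem.List.pyGet? ds (-1)) =
      PySem.List.pyGet? ds (-1) := by
  cases ds <;> simp [PySem.List.pyGet?, PySem.List.pyIdx?]

-- A's inner break condition equals B's `stops`
theorem pv_stop_eq (ve : List String) (tok : String) :
    (((if (pvSplitDot tok).length = 0 then (none : Option String)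
        else PySem.List.pyGet? (pvSplitDot tok) (-1)).elim false (fun e => ve.contains e))
      || (PySem.Str.pyGet? tok 0 == some '-')) = pvBStops ve tok := by
  rw [pv_ending_eq, pv_dash_eq, pvBStops, pvSplitDot]

-- the two ways of registering a fresh flag key agree
theorem pv_register_eq (d : PySem.Dict String (List String)) (f : String) :
    (if d.contains f then d else d.insert f []) = d.setdefault f [] := by
  by_cases h : d.contains f
  · simp [h, PySem.Dict.setdefault_of_contains d [] h]
  · simp [h, PySem.Dict.setdefault_of_not_contains d [] (by simpa using h)]

-- two modifies at the same key compose
theorem pv_modify_modify {κ ν : Type} [BEq κ] [LawfulBEq κ] (d : PySem.Dict κ ν)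
    (k : κ) (d0 : ν) (f g : ν → ν) :
    (d.modify k d0 f).modify k d0 g = d.modify k d0 (fun v => g (f v)) := by
  show (d.modify k d0 f).insert k (g ((d.modify k d0 f).getD k d0)) = _
  rw [PySem.Dict.getD_modify_self]
  show ((d.insert k _).insert k _) = d.insert k _
  rw [PySem.Dict.insert_insert_self]

-- a run of single-token appends at one key is one append of the run
theorem pv_foldl_modify_acc (k : String) :
    ∀ (ts acc : List String) (d : PySem.Dict String (List String)),
      ts.foldl (fun d t => d.modify k [] (fun l => l ++ [t])) (d.modify k [] (fun l => l ++ acc))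
        = d.modify k [] (fun l => l ++ (acc ++ ts)) := by
  intro ts
  induction ts with
  | nil => intro acc d; simp
  | cons t ts ih =>
    intro acc d
    simp only [List.foldl_cons]
    rw [pv_modify_modify]
    have : (fun v => (v ++ acc) ++ [t]) = (fun v : List String => v ++ (acc ++ [t])) := by
      funext v; simp
    rw [this, ih (acc ++ [t]) d]
    simp

-- re-inserting the present value is the identity (keys unique)
theorem pv_map_id_of_nodup {κ ν : Type} [BEq κ] [LawfulBEq κ] :
    ∀ (items : List (κ × ν)) (k : κ) (v : ν),
      (items.map Prod.fst).Nodup → items.any (fun p => p.1 == k) = true →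
      (Option.map (fun x => x.2) (List.find? (fun p => p.1 == k) items)).getD v = v →
      items.map (fun p => if (p.1 == k) = true then (k, v) else p) = items := by
  intro items
  induction items with
  | nil => intro k v _ hc _; simp at hc
  | cons a rest ih =>
    intro k v hnd hc hv
    simp only [List.map_cons] at *
    by_cases hak : (a.1 == k) = true
    · have hk : a.1 = k := by simpa using hak
      simp only [List.find?_cons, hak] at hv
      simp only [Option.map_some, Option.getD_some] at hv
      have hrest : ∀ p ∈ rest, (p.1 == k) = false := by
        intro p hp
        have hpa : p.1 ≠ a.1 := by
          have := (List.nodup_cons.mp hnd).1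
          intro he; exact this (he ▸ List.mem_map_of_mem hp)
        simp [hk ▸ hpa]
      congr 1
      · simp [← hk, ← hv]
      · apply List.map_congr_left ?_ |>.trans (List.map_id _)
        intro p hp; simp [hrest p hp]
    · simp only [List.any_cons, hak, Bool.false_or] at hc
      simp only [List.find?_cons, hak] at hv
      congr 1
      · simp [hak]
      · exact ih k v (List.nodup_cons.mp hnd).2 hc hv

-- re-inserting the present value is the identity (keys unique)
theorem pv_insert_getD_self {κ ν : Type} [BEq κ] [LawfulBEq κ]
    (d : PySem.Dict κ ν) (k : κ) (dflt : ν)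
    (hnd : d.keys.Nodup) (hc : d.contains k = true) :
    d.insert k (d.getD k dflt) = d := by
  obtain ⟨items⟩ := d
  show (if _ then _ else _) = _
  rw [if_pos hc]
  congr 1
  exact pv_map_id_of_nodup items k _ (by simpa [PySem.Dict.keys] using hnd)
    (by simpa [PySem.Dict.contains] using hc)
    (by simp only [PySem.Dict.getD, PySem.Dict.get?]
        cases List.find? (fun p => p.1 == k) items <;> rfl)

-- A's incremental appends from the registered dict equal B's single extend
theorem pv_afold (k : String) (ts : List String) (d : PySem.Dict String (List String))
    (hnd : d.keys.Nodup) :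
    ts.foldl (fun d t => d.modify k [] (fun l => l ++ [t])) (d.setdefault k [])
      = (d.setdefault k []).modify k [] (fun l => l ++ ts) := by
  by_cases hc : d.contains k = true
  · rw [PySem.Dict.setdefault_of_contains d [] hc]
    have hd : d = d.modify k [] (fun l => l ++ []) := by
      show d = d.insert k _
      simp only []
      rw [List.append_nil, pv_insert_getD_self d k [] hnd hc]
    calc ts.foldl (fun d t => d.modify k [] (fun l => l ++ [t])) d
        = ts.foldl (fun d t => d.modify k [] (fun l => l ++ [t])) (d.modify k [] (fun l => l ++ [])) := by rw [← hd]
      _ = d.modify k [] (fun l => l ++ ([] ++ ts)) := pv_foldl_modify_acc k ts [] d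
      _ = d.modify k [] (fun l => l ++ ts) := by simp
  · have hc' : d.contains k = false := by simpa using hc
    rw [PySem.Dict.setdefault_of_not_contains d [] hc']
    have hd : d.insert k [] = d.modify k [] (fun l => l ++ []) := by
      show _ = d.insert k _
      simp only []
      rw [List.append_nil, PySem.Dict.getD_of_not_contains d [] hc']
    rw [hd, pv_foldl_modify_acc k ts [] d, pv_modify_modify]
    simp

-- the inner loop's accumulator only prepends: reduce any start to the empty accumulator
theorem pvBTake_acc (ve : List String) :
    ∀ (l args : List String),
      pvBTake ve args l = (args ++ (pvBTake ve [] l).1, (pvBTake ve [] l).2) := by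
  intro l
  induction l with
  | nil => intro args; simp [pvBTake]
  | cons t rest ih =>
    intro args
    by_cases h : pvBStops ve t
    · simp [pvBTake, h]
    · simp only [pvBTake, h, if_false, Bool.false_eq_true, List.nil_append]
      rw [ih (args ++ [t]), ih [t]]
      simp

theorem pvBTake_append (ve : List String) :
    ∀ l : List String, (pvBTake ve [] l).1 ++ (pvBTake ve [] l).2 = l := by
  intro l
  induction l with
  | nil => simp [pvBTake]
  | cons t rest ih =>
    simp only [pvBTake]
    by_cases h : pvBStops ve t
    · simp [h]
    · simp only [h, if_false, Bool.false_eq_true, List.nil_append]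
      rw [pvBTake_acc ve rest [t]]
      simpa using ih

theorem pvBTake_not_stops (ve : List String) :
    ∀ (l : List String) (t : String), t ∈ (pvBTake ve [] l).1 → pvBStops ve t = false := by
  intro l
  induction l with
  | nil => intro t ht; simp [pvBTake] at ht
  | cons x rest ih =>
    intro t ht
    simp only [pvBTake] at ht
    by_cases h : pvBStops ve x
    · simp [h] at ht
    · simp only [h, if_false, Bool.false_eq_true, List.nil_append] at ht
      rw [pvBTake_acc ve rest [x]] at ht
      simp only [List.cons_append, List.nil_append, List.mem_cons] at ht
      rcases ht with rfl | ht
      · simpa using h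
      · exact ih t ht

-- the outer loop's pair accumulator only appends; its pairs ignore the kept accumulator
theorem pvBLoop_pairs_acc (ve : List String) :
    ∀ (n : Nat) (l : List String), l.length ≤ n →
      ∀ (kept : List String) (pairs : List (String × List String)),
        (pvBLoop ve l kept pairs).2 = pairs ++ (pvBLoop ve l [] []).2 := by
  intro n
  induction n with
  | zero =>
    intro l hl kept pairs
    have : l = [] := List.eq_nil_of_length_eq_zero (by omega)
    subst this
    simp [pvBLoop]
  | succ n ih =>
    intro l hl kept pairs
    cases l with
    | nil => simp [pvBLoop]
    | cons tok rest =>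
      by_cases hf : ((PySem.Str.slice tok none (some 1) == "-")
          && decide ((1 : Int) < PySem.Str.len tok)) = true
      · simp only [pvBLoop, hf, if_pos]
        have hlen : (pvBTake ve [] rest).2.length ≤ n := by
          have := pvBTake_snd_le ve rest []
          simp at hl; omega
        rw [ih _ hlen kept (pairs ++ [(PySem.Str.slice tok (some 1) none, (pvBTake ve [] rest).1)]),
          ih _ hlen [] ([] ++ [(PySem.Str.slice tok (some 1) none, (pvBTake ve [] rest).1)])]
        simp
      · simp only [pvBLoop, hf, if_false, Bool.false_eq_true]
        have hlen : rest.length ≤ n := by simp at hl; omega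
        rw [ih _ hlen (kept ++ [tok]) pairs, ih _ hlen ([] ++ [tok]) []]
        simp

-- one step of B's outer loop, seen on the pair stream
theorem pvBPairs_cons (ve : List String) (tok : String) (rest : List String) :
    (pvBLoop ve (tok :: rest) [] []).2 =
      if ((PySem.Str.slice tok none (some 1) == "-")
          && decide ((1 : Int) < PySem.Str.len tok)) = true then
        (PySem.Str.slice tok (some 1) none, (pvBTake ve [] rest).1)
          :: (pvBLoop ve (pvBTake ve [] rest).2 [] []).2
      else (pvBLoop ve rest [] []).2 := by
  by_cases hf : ((PySem.Str.slice tok none (some 1) == "-")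
      && decide ((1 : Int) < PySem.Str.len tok)) = true
  · simp only [pvBLoop, hf, if_pos]
    rw [pvBLoop_pairs_acc ve (pvBTake ve [] rest).2.length _ (Nat.le_refl _)]
    simp
  · simp only [pvBLoop, hf, if_false, Bool.false_eq_true]
    rw [pvBLoop_pairs_acc ve rest.length rest (Nat.le_refl _) ([] ++ [tok]) []]
    simp

-- A's inner while-loop computes exactly the run B's take_args takes
theorem pv_inner_closed (args ve : List String) (flag : String) :
    ∀ (fuel idx : Nat) (d : PySem.Dict String (List String)) (ids : List Nat),
      args.length - idx ≤ fuel →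
      (pvAInner args ve args.length flag fuel idx d ids).1
          = ((pvBTake ve [] (args.drop idx)).1).foldl
              (fun d t => d.modify flag [] (fun l => l ++ [t])) d
        ∧ (pvAInner args ve args.length flag fuel idx d ids).2.2
          = idx + (pvBTake ve [] (args.drop idx)).1.length := by
  intro fuel
  induction fuel with
  | zero =>
    intro idx d ids hfu
    have hdrop : args.drop idx = [] := List.drop_eq_nil_of_le (by omega)
    simp [pvAInner, hdrop, pvBTake]
  | succ fuel ih =>
    intro idx d ids hfu
    by_cases hidx : idx < args.length
    · have hdrop : args.drop idx = args[idx] :: args.drop (idx + 1) :=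
        List.drop_eq_getElem_cons hidx
      have htok : args.getD idx "" = args[idx] := List.getD_eq_getElem args "" hidx
      simp only [pvAInner, hidx, if_pos, hdrop, pvBTake, htok]
      rw [pv_stop_eq]
      by_cases hs : pvBStops ve args[idx] = true
      · simp [hs]
      · simp only [hs, if_false, Bool.false_eq_true]
        rw [pvBTake_acc ve (args.drop (idx + 1)) ([] ++ [args[idx]])]
        simp only [List.cons_append, List.nil_append, List.foldl_cons, List.length_cons]
        obtain ⟨h1, h2⟩ := ih (idx + 1) (d.modify flag [] (fun l => l ++ [args[idx]]))
          (ids ++ [idx]) (by omega)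
        refine ⟨h1, ?_⟩
        rw [h2]
        omega
    · have hdrop : args.drop idx = [] := List.drop_eq_nil_of_le (by omega)
      simp [pvAInner, hidx, hdrop, pvBTake]

-- with enough fuel, pvAOuter does not depend on the exact fuel value
theorem pvAOuter_fuel (args ve : List String) (n : Nat) :
    ∀ (f1 f2 i : Nat) (d : PySem.Dict String (List String)) (ids : List Nat),
    n - i ≤ f1 → n - i ≤ f2 →
    pvAOuter args ve n f1 i d ids = pvAOuter args ve n f2 i d ids := by
  intro f1
  induction f1 with
  | zero =>
    intro f2 i d ids h1 h2
    have hi : ¬ i < n := by omega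
    cases f2 with
    | zero => rfl
    | succ f2 => simp [pvAOuter, hi]
  | succ f1 ih =>
    intro f2 i d ids h1 h2
    by_cases hi : i < n
    · cases f2 with
      | zero => omega
      | succ f2 =>
        simp only [pvAOuter, hi, if_pos]
        by_cases hf : ((PySem.Str.pyGet? (args.getD i "") 0 == some '-')
            && decide ((1 : Int) < PySem.Str.len (args.getD i ""))) = true
        · rw [if_pos hf, if_pos hf]
          exact ih f2 (i + 1) _ _ (by omega) (by omega)
        · rw [if_neg hf, if_neg hf]
          exact ih f2 (i + 1) _ _ (by omega) (by omega)
    · cases f2 with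
      | zero => simp [pvAOuter, hi]
      | succ f2 => simp [pvAOuter, hi]

-- A's outer loop does nothing on a range of tokens none of which starts with '-'
theorem pvAOuter_skip (args ve : List String) (n : Nat) :
    ∀ (c fuel m : Nat) (d : PySem.Dict String (List String)) (ids : List Nat),
      n - m ≤ fuel →
      (∀ t, m ≤ t → t < m + c → (PySem.Str.pyGet? (args.getD t "") 0 == some '-') = false) →
      pvAOuter args ve n fuel m d ids = pvAOuter args ve n fuel (m + c) d ids := by
  intro c
  induction c with
  | zero => intro fuel m d ids _ _; rfl
  | succ c ih =>
    intro fuel m d ids hfu hsk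
    by_cases hm : m < n
    · have hcur : (PySem.Str.pyGet? (args.getD m "") 0 == some '-') = false :=
        hsk m (Nat.le_refl m) (by omega)
      cases fuel with
      | zero => omega
      | succ fuel =>
        have step : pvAOuter args ve n (fuel + 1) m d ids
            = pvAOuter args ve n fuel (m + 1) d ids := by
          simp only [pvAOuter, hm, if_pos, hcur]
          simp
        rw [step, ih fuel (m + 1) d ids (by omega)
          (fun t ht1 ht2 => hsk t (by omega) (by omega))]
        rw [pvAOuter_fuel args ve n fuel (fuel + 1) (m + 1 + c) d ids (by omega) (by omega)]
        congr 1
        omega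
    · have hm2 : ¬ m + (c + 1) < n := by omega
      cases fuel with
      | zero => rfl
      | succ fuel => simp [pvAOuter, hm, hm2]

-- B's fold step keeps the keys unique
theorem pv_bstep_nodup (d : PySem.Dict String (List String)) (p : String × List String)
    (hnd : d.keys.Nodup) :
    ((d.setdefault p.1 []).modify p.1 [] (fun l => l ++ p.2)).keys.Nodup := by
  have h1 : (d.setdefault p.1 []).keys.Nodup := by
    by_cases hc : d.contains p.1 = true
    · rwa [PySem.Dict.setdefault_of_contains d [] hc]
    · rw [PySem.Dict.setdefault_of_not_contains d [] (by simpa using hc)]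
      exact PySem.Dict.nodup_keys_insert d p.1 [] hnd
  exact PySem.Dict.nodup_keys_insert _ p.1 _ h1

-- MAIN: A's outer loop equals B's pair fold over the tail stream
theorem pv_main (args ve : List String) :
    ∀ (k fa i : Nat) (d : PySem.Dict String (List String)) (ids : List Nat),
      args.length - i ≤ k → args.length - i ≤ fa → d.keys.Nodup →
      (pvAOuter args ve args.length fa i d ids).1
        = ((pvBLoop ve (args.drop i) [] []).2).foldl
            (fun d p => (d.setdefault p.1 []).modify p.1 [] (fun l => l ++ p.2)) d := by
  intro k
  induction k with
  | zero =>
    intro fa i d ids hk hfa hnd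
    have hdrop : args.drop i = [] := List.drop_eq_nil_of_le (by omega)
    have hi : ¬ i < args.length := by omega
    cases fa with
    | zero => simp [pvAOuter, hdrop, pvBLoop]
    | succ fa => simp [pvAOuter, hi, hdrop, pvBLoop]
  | succ k ih =>
    intro fa i d ids hk hfa hnd
    by_cases hi : i < args.length
    · cases fa with
      | zero => omega
      | succ fa =>
        have hdrop : args.drop i = args[i] :: args.drop (i + 1) :=
          List.drop_eq_getElem_cons hi
        have htok : args.getD i "" = args[i] := List.getD_eq_getElem args "" hi
        simp only [pvAOuter, hi, if_pos, htok, hdrop]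
        rw [pvBPairs_cons, pv_dash_eq]
        by_cases hf : ((PySem.Str.slice args[i] none (some 1) == "-")
            && decide ((1 : Int) < PySem.Str.len args[i])) = true
        · rw [if_pos hf, if_pos hf]
          rw [pv_register_eq]
          set flag := PySem.Str.slice args[i] (some 1) none with hflag
          set ts := (pvBTake ve [] (args.drop (i + 1))).1 with hts
          set rest2 := (pvBTake ve [] (args.drop (i + 1))).2 with hrest2
          have hr1 := (pv_inner_closed args ve flag args.length (i + 1)
            (d.setdefault flag []) (ids ++ [i]) (by omega)).1
          rw [hr1, pv_afold flag ts d hnd]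
          -- A's outer loop skips over the consumed range [i+1, i+1+ts.length)
          have hrest2' : args.drop (i + 1 + ts.length) = rest2 := by
            have happ : ts ++ rest2 = args.drop (i + 1) := pvBTake_append ve (args.drop (i + 1))
            calc args.drop (i + 1 + ts.length)
                = (args.drop (i + 1)).drop ts.length := by rw [List.drop_drop]
              _ = (ts ++ rest2).drop ts.length := by rw [happ]
              _ = rest2 := List.drop_left
          have hskip := pvAOuter_skip args ve args.length ts.length fa (i + 1)
            ((d.setdefault flag []).modify flag [] (fun l => l ++ ts))
            (pvAInner args ve args.length flag args.length (i + 1)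
              (d.setdefault flag []) (ids ++ [i])).2.1
            (by omega)
            (by
              intro t ht1 ht2
              have hp : t - (i + 1) < ts.length := by omega
              have hget : args.getD t "" = ts[t - (i + 1)] := by
                rw [List.getD_eq_getElem?_getD]
                have h1 : args[t]? = (args.drop (i + 1))[t - (i + 1)]? := by
                  rw [List.getElem?_drop]; congr 1; omega
                have happ : ts ++ rest2 = args.drop (i + 1) :=
                  pvBTake_append ve (args.drop (i + 1))
                rw [h1, ← happ, List.getElem?_append_left hp,
                  List.getElem?_eq_getElem hp]
                rfl
              have hmem : args.getD t "" ∈ ts := by rw [hget]; exact List.getElem_mem hp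
              have hstop := pvBTake_not_stops ve (args.drop (i + 1)) _ hmem
              rw [pv_dash_eq]
              simp only [pvBStops, Bool.or_eq_false_iff] at hstop
              exact hstop.2)
          rw [hskip]
          rw [ih fa (i + 1 + ts.length)
            ((d.setdefault flag []).modify flag [] (fun l => l ++ ts)) _
            (by omega) (by omega) (pv_bstep_nodup d (flag, ts) hnd)]
          rw [hrest2']
          simp
        · rw [if_neg hf, if_neg hf]
          exact ih fa (i + 1) d ids (by omega) (by omega) hnd
    · have hdrop : args.drop i = [] := List.drop_eq_nil_of_le (by omega)
      cases fa with
      | zero => simp [pvAOuter, hdrop, pvBLoop]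
      | succ fa => simp [pvAOuter, hi, hdrop, pvBLoop]

-- ===== VERDICT (by name: the statement is the Claim_ definition above) =====
theorem extract_flag_args_spec : Claim_equal_extract_flag_args := by
  intro arg_list valid_file_endings _ _
  unfold Spec_extract_flag_args extract_flag_args extract_flag_args_alt
  rw [pv_main arg_list valid_file_endings arg_list.length arg_list.length 0 PySem.Dict.empty []
    (by omega) (by omega) PySem.Dict.nodup_keys_empty]
  simp
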